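-- pv_equiv track=rewrite | github.com/Leg1onary/galera_orchestrator_v2 | backend/services/recovery.py | _select_bootstrap_candidate
-- ===== SOURCE A (Python) =====
-- def _select_bootstrap_candidate(scan_results: list[dict]) -> dict | None:
--     """
--     Select the best bootstrap candidate.
--
--     Priority:
--       1. Node with safe_to_bootstrap=1 AND highest seqno
--       2. If no safe_to_bootstrap, node with highest seqno > 0 (risky, but best option)
--       3. None — no viable candidate
--     """
--     reachable = [r for r in scan_results if r["error"] is None]
--     if not reachable:
--         return None
--
--     # Prefer nodes explicitly marked safe_to_bootstrap
--     safe_nodes = [r for r in reachable if r["safe_to_bootstrap"]]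
--     if safe_nodes:
--         return max(safe_nodes, key=lambda r: r["seqno"])
--
--     # Fallback: highest positive seqno
--     positive = [r for r in reachable if r["seqno"] > 0]
--     if positive:
--         return max(positive, key=lambda r: r["seqno"])
--
--     return None
-- ===== SOURCE B (Python) =====
-- def _select_bootstrap_candidate(scan_results: list[dict]) -> dict | None:
--     """One-pass selection: track the first-seen max-seqno safe node and the
--     first-seen max-seqno positive node simultaneously; prefer the safe one."""
--     best_safe = best_safe_s = None
--     best_pos = best_pos_s = None
--     for r in scan_results:
--         if r["error"] is not None:
--             continue
--         s = r["seqno"]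
--         if r["safe_to_bootstrap"]:
--             if best_safe is None or s > best_safe_s:
--                 best_safe, best_safe_s = r, s
--         elif s is not None and s > 0:
--             if best_pos is None or s > best_pos_s:
--                 best_pos, best_pos_s = r, s
--     return best_safe if best_safe is not None else best_pos
-- ===== Notes on version B (the rewrite author's own statement) =====
-- stated objective: alternative
-- what changed: Replaces A's three intermediate filtered lists plus two max() scans with a single pass holding O(1) state: the first-seen maximum-seqno safe node and positive node, strict '>' preserving max()'s first-occurrence tie-break.
import Mathlib
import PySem

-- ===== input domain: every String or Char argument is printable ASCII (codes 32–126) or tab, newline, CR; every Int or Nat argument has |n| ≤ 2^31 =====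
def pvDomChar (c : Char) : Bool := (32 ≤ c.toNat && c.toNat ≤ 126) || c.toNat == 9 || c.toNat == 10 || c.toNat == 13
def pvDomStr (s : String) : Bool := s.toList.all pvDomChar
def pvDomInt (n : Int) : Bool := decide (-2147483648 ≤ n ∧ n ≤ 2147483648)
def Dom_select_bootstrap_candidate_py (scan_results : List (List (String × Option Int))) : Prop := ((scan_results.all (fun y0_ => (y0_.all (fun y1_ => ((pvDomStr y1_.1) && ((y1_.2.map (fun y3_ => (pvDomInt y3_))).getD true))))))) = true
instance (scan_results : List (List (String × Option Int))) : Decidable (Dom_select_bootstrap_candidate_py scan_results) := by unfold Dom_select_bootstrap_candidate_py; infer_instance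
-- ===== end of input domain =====

-- B is the same selection done in ONE pass with O(1) state (first-seen max-seqno safe / positive node)
-- instead of A's three filtered lists and two max() scans; equal on all Pre_ inputs (proved below).

-- shared row-access helpers (dict rows are association lists; lookup = first match):
-- r["k"]: under Pre_ the keys Python actually reads are present, so the `.getD` defaults are never hit there
def rowGet (r : List (String × Option Int)) (k : String) : Option Int :=
  (List.lookup k r).getD none

-- Python truthiness of the stored value (None and 0 are falsy)
def truthyOpt (v : Option Int) : Bool :=
  match v with
  | none => false
  | some n => n != 0

-- r["seqno"] as the Int Python compares; under Pre_ the value is always `some n`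
def seqOf (r : List (String × Option Int)) : Int :=
  (rowGet r "seqno").getD 0

-- r["error"] is None  /  bool(r["safe_to_bootstrap"])
def reachB (r : List (String × Option Int)) : Bool := rowGet r "error" == none
def safeB (r : List (String × Option Int)) : Bool := truthyOpt (rowGet r "safe_to_bootstrap")

-- ===== PORT A =====
def select_bootstrap_candidate_py (scan_results : List (List (String × Option Int))) : Option (List (String × Option Int)) :=
  let reachable := scan_results.filter reachB
  if reachable.isEmpty then none
  else
    let safe_nodes := reachable.filter safeB
    if !safe_nodes.isEmpty then
      PySem.List.max? safe_nodes seqOf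
    else
      let positive := reachable.filter (fun r => seqOf r > 0)
      if !positive.isEmpty then
        PySem.List.max? positive seqOf
      else
        none

-- ===== PORT B =====
-- Source B's "if best is None or s > best_s: best, best_s = r, s" update
def upd (best : Option (List (String × Option Int) × Int)) (r : List (String × Option Int)) :
    Option (List (String × Option Int) × Int) :=
  match best with
  | none => some (r, seqOf r)
  | some (_, bs) => if seqOf r > bs then some (r, seqOf r) else best

-- loop body of Source B: first component = (best_safe, best_safe_s), second = (best_pos, best_pos_s)
def bStep (st : Option (List (String × Option Int) × Int) × Option (List (String × Option Int) × Int))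
    (r : List (String × Option Int)) :
    Option (List (String × Option Int) × Int) × Option (List (String × Option Int) × Int) :=
  if !reachB r then st
  else if safeB r then (upd st.1 r, st.2)
  else if seqOf r > 0 then (st.1, upd st.2 r)
  else st

def select_bootstrap_candidate_py_alt (scan_results : List (List (String × Option Int))) : Option (List (String × Option Int)) :=
  let st := scan_results.foldl bStep (none, none)
  match st.1 with
  | some (r, _) => some r
  | none => st.2.map Prod.fst

-- ===== PRECONDITION & SPEC =====
-- Pre_ excludes the inputs where the Python raises: a row without an "error" key (KeyError), or a
-- reachable row missing "safe_to_bootstrap"/"seqno" or whose seqno is None (KeyError / TypeError on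
-- comparison). The single corner where A nevertheless returns — exactly one safe node and its seqno
-- is None — is excluded with them; B returns the same dict there (see claim cite).
def Pre_select_bootstrap_candidate_py (scan_results : List (List (String × Option Int))) : Prop :=
  (scan_results.all (fun r =>
    (List.lookup "error" r).isSome &&
    (if rowGet r "error" == none then
       (List.lookup "safe_to_bootstrap" r).isSome && (rowGet r "seqno").isSome
     else true))) = true
instance (scan_results : List (List (String × Option Int))) : Decidable (Pre_select_bootstrap_candidate_py scan_results) := by unfold Pre_select_bootstrap_candidate_py; infer_instance

def pvWitness_select_bootstrap_candidate_py : (List (List (String × Option Int))) :=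
  [[("error", none), ("safe_to_bootstrap", some 1), ("seqno", some 5)],
   [("error", some 1), ("safe_to_bootstrap", none)],
   [("error", none), ("safe_to_bootstrap", some 0), ("seqno", some 7)]]

def Spec_select_bootstrap_candidate_py (scan_results : List (List (String × Option Int))) (out : Option (List (String × Option Int))) : Prop := out = select_bootstrap_candidate_py_alt scan_results
instance (scan_results : List (List (String × Option Int))) (out : Option (List (String × Option Int))) : Decidable (Spec_select_bootstrap_candidate_py scan_results out) := by unfold Spec_select_bootstrap_candidate_py; infer_instance

-- ===== CLAIM (what is proved, stated in full; the proofs are below) =====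
def Claim_equal_select_bootstrap_candidate_py : Prop := ∀ (scan_results : List (List (String × Option Int))), Dom_select_bootstrap_candidate_py scan_results → Pre_select_bootstrap_candidate_py scan_results → Spec_select_bootstrap_candidate_py scan_results (select_bootstrap_candidate_py scan_results)

-- ===== LEMMAS AND PROOFS =====

-- "non-safe positive row": what B's elif branch selects among reachable rows
def posB (r : List (String × Option Int)) : Bool := !safeB r && seqOf r > 0

-- the one-component running-max loop (what each half of bStep does to its own component)
def mx1 (l : List (List (String × Option Int))) (st : Option (List (String × Option Int) × Int)) :
    Option (List (String × Option Int) × Int) :=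
  l.foldl upd st

lemma mx1_cons (r : List (String × Option Int)) (t : List (List (String × Option Int)))
    (st : Option (List (String × Option Int) × Int)) :
    mx1 (r :: t) st = mx1 t (upd st r) := rfl

-- one step of B's fold, written componentwise
lemma bStep_eq (st : Option (List (String × Option Int) × Int) × Option (List (String × Option Int) × Int))
    (r : List (String × Option Int)) :
    bStep st r = (if reachB r && safeB r then upd st.1 r else st.1,
                  if reachB r && posB r then upd st.2 r else st.2) := by
  rcases st with ⟨s1, s2⟩
  by_cases hr : reachB r
  · by_cases hs : safeB r
    · simp [bStep, posB, hr, hs]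
    · by_cases hp : seqOf r > 0
      · simp [bStep, posB, hr, hs, hp]
      · simp [bStep, posB, hr, hs, hp]
  · simp [bStep, posB, hr]

-- B's fold splits into two independent running-max loops over the safe and the (non-safe) positive rows
lemma foldl_bStep_split (l : List (List (String × Option Int)))
    (st : Option (List (String × Option Int) × Int) × Option (List (String × Option Int) × Int)) :
    l.foldl bStep st =
      (mx1 ((l.filter reachB).filter safeB) st.1,
       mx1 ((l.filter reachB).filter posB) st.2) := by
  induction l generalizing st with
  | nil => rfl
  | cons r t ih =>
    rw [List.foldl_cons, ih, bStep_eq]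
    by_cases hr : reachB r
    · by_cases hs : safeB r
      · have hp : posB r = false := by simp [posB, hs]
        simp [hr, hs, hp, mx1_cons]
      · by_cases hp : posB r
        · simp [hr, hs, hp, mx1_cons]
        · simp [hr, hs, hp]
    · simp [hr]

-- folding one more element into Python's max(key=) scan
lemma max?_cons₂ (m r : List (String × Option Int)) (u : List (List (String × Option Int))) :
    PySem.List.max? (m :: r :: u) seqOf =
      PySem.List.max? ((if seqOf m < seqOf r then r else m) :: u) seqOf := by
  by_cases h : seqOf m < seqOf r <;> simp [PySem.List.max?, h]

-- the running-max loop with a cached key, started at some element, is max()'s scan of m :: t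
lemma mx1_some (t : List (List (String × Option Int))) (m : List (String × Option Int)) :
    mx1 t (some (m, seqOf m)) =
      (PySem.List.max? (m :: t) seqOf).map (fun x => (x, seqOf x)) := by
  induction t generalizing m with
  | nil => rfl
  | cons r u ih =>
    rw [mx1_cons]
    by_cases h : seqOf m < seqOf r
    · rw [show upd (some (m, seqOf m)) r = some (r, seqOf r) by simp [upd, gt_iff_lt, h],
          max?_cons₂, if_pos h]
      exact ih r
    · rw [show upd (some (m, seqOf m)) r = some (m, seqOf m) by simp [upd, gt_iff_lt, h],
          max?_cons₂, if_neg h]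
      exact ih m

-- the running-max loop is Python's max(key=) with the key cached alongside
lemma mx1_eq_max? (l : List (List (String × Option Int))) :
    mx1 l none = (PySem.List.max? l seqOf).map (fun m => (m, seqOf m)) := by
  cases l with
  | nil => rfl
  | cons r t =>
    rw [mx1_cons, show upd none r = some (r, seqOf r) from rfl, mx1_some]

-- A = B unconditionally (the ports totalize the raising lookups in the same way)
lemma ab_eq (l : List (List (String × Option Int))) :
    select_bootstrap_candidate_py l = select_bootstrap_candidate_py_alt l := by
  unfold select_bootstrap_candidate_py select_bootstrap_candidate_py_alt
  rw [foldl_bStep_split]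
  simp only [mx1_eq_max?]
  cases hs : PySem.List.max? ((l.filter reachB).filter safeB) seqOf with
  | some m =>
    -- a safe node exists: both sides are the first max-seqno safe node
    have hSne : (l.filter reachB).filter safeB ≠ [] := by
      intro h
      rw [h] at hs
      simp [PySem.List.max?] at hs
    have hRne : l.filter reachB ≠ [] := fun h => hSne (by rw [h]; rfl)
    have c1 : (l.filter reachB).isEmpty = false := by
      cases h : l.filter reachB with
      | nil => exact absurd h hRne
      | cons a t => rfl
    have c2 : ((l.filter reachB).filter safeB).isEmpty = false := by
      cases h : (l.filter reachB).filter safeB with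
      | nil => exact absurd h hSne
      | cons a t => rfl
    simp [c1, c2, -List.filter_filter]
  | none =>
    -- no safe node: B falls through to its positive component
    rw [PySem.List.max?_eq_none_iff] at hs
    have hPb : (l.filter reachB).filter posB =
        (l.filter reachB).filter (fun r => seqOf r > 0) := by
      apply List.filter_congr
      intro x hx
      have hxs : safeB x = false := by
        by_contra hxs
        have : x ∈ (l.filter reachB).filter safeB :=
          List.mem_filter.mpr ⟨hx, by revert hxs; cases safeB x <;> simp⟩
        simp [hs] at this
      simp [posB, hxs]
    rw [hs, hPb]
    cases hp : PySem.List.max? ((l.filter reachB).filter (fun r => seqOf r > 0)) seqOf with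
    | some m =>
      have hPne : (l.filter reachB).filter (fun r => seqOf r > 0) ≠ [] := by
        intro h
        rw [h] at hp
        simp [PySem.List.max?] at hp
      have hRne : l.filter reachB ≠ [] := fun h => hPne (by rw [h]; rfl)
      have c1 : (l.filter reachB).isEmpty = false := by
        cases h : l.filter reachB with
        | nil => exact absurd h hRne
        | cons a t => rfl
      have cP : ((l.filter reachB).filter (fun r => seqOf r > 0)).isEmpty = false := by
        cases h : (l.filter reachB).filter (fun r => seqOf r > 0) with
        | nil => exact absurd h hPne
        | cons a t => rfl
      simp [c1, cP, -List.filter_filter]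
    | none =>
      rw [PySem.List.max?_eq_none_iff] at hp
      rw [hp]
      by_cases hR : l.filter reachB = []
      · simp [hR]
      · simp [hR, List.isEmpty_iff]

-- ===== VERDICT (by name: the statement is the Claim_ definition above) =====
theorem select_bootstrap_candidate_py_spec : Claim_equal_select_bootstrap_candidate_py := by
  intro l _ _
  unfold Spec_select_bootstrap_candidate_py
  exact ab_eq l
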